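-- pv_equiv track=rewrite | github.com/PyBeaner/ProblemSolvingwithAlgorithmsandDataStructures | Chapter 2. Algorithm Analysis/exercises.py | smallest_k
-- ===== SOURCE A (Python) =====
-- key = 0
--
-- def smallest_k(the_list, k):
--     # sort the list
--     counts = {}
--     # O(n)
--     for i in range(len(the_list)):
--         ele = the_list[i]
--         counts.setdefault(ele, 0)
--         counts[ele] += 1
--     return_list = []
--     # len(counts)
--     for key in counts:
--         count = counts[key]
--         take = min(k, count)
--         return_list += [key] * take
--         k -= take
--         if k <= 0:
--             break
--     return return_list
--
-- k = 1
-- ===== SOURCE B (Python) =====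
-- def smallest_k(the_list, k):
--     # Sort-based: record each value's first-occurrence index in one pass, then a
--     # stable sort by that index groups duplicates in first-appearance order;
--     # one slice truncates to the first max(k, 0) elements.
--     first = {}
--     for i, x in enumerate(the_list):
--         if x not in first:
--             first[x] = i
--     return sorted(the_list, key=lambda x: first[x])[:max(k, 0)]
-- ===== Notes on version B (the rewrite author's own statement) =====
-- stated objective: alternative
-- what changed: B replaces A's counting dict plus budgeted emission loop (min/decrement/break per key) with a sort: it records each value's first-occurrence index in one pass and stably sorts the list by that index, which groups duplicates in first-appearance order, then truncates with a single slice [:max(k,0)].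
import Mathlib
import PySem

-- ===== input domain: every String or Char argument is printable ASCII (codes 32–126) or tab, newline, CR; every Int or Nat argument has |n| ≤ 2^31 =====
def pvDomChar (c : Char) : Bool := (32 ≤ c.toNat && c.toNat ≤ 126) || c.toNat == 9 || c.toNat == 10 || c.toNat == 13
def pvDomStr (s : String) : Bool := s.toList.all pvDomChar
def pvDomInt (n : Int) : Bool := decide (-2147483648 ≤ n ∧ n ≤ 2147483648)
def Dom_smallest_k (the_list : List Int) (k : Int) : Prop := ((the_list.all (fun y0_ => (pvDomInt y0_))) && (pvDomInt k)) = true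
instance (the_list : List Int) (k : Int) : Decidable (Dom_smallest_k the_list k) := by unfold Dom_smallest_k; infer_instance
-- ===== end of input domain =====

-- B replaces A's counting dict + budgeted emission (min/decrement/break) with a stable sort
-- by first-occurrence index, then one truncating slice.  Objective: alternative.

-- ===== PORT A =====
-- second loop of A: 'for key in counts: count = counts[key]; take = min(k, count);
-- return_list += [key]*take; k -= take; if k <= 0: break'
def smallestKLoopA : List Int → PySem.Dict Int Int → Int → List Int
  | [], _, _ => []
  | key :: rest, counts, k =>
      let count := counts.getD key 0   -- counts[key]; key ∈ counts.keys so present, default unused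
      let take := min k count
      let chunk := List.replicate take.toNat key   -- [key] * take ([] for take ≤ 0)
      let k' := k - take
      if k' ≤ 0 then chunk else chunk ++ smallestKLoopA rest counts k'

def smallest_k (the_list : List Int) (k : Int) : List Int :=
  -- first loop: for i in range(len): ele = the_list[i]; counts.setdefault(ele, 0); counts[ele] += 1
  let counts := (PySem.List.pyRange 0 (the_list.length : Int) 1).foldl
    (fun d i =>
      let ele := PySem.List.pyGetD the_list i 0   -- i always in range
      let d := d.setdefault ele 0
      d.insert ele (d.getD ele 0 + 1))            -- counts[ele] += 1; key present, default unused
    PySem.Dict.empty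
  smallestKLoopA counts.keys counts k

-- ===== PORT B =====
def smallest_k_alt (the_list : List Int) (k : Int) : List Int :=
  -- first loop: for i, x in enumerate(the_list): if x not in first: first[x] = i
  let first := (PySem.List.enumerate the_list).foldl
    (fun d p => if d.contains p.2 then d else d.insert p.2 p.1)
    (PySem.Dict.empty : PySem.Dict Int Int)
  -- sorted(the_list, key=lambda x: first[x])[:max(k, 0)]; x always a key of first, default unused
  PySem.List.slice (PySem.List.sorted the_list (fun x => first.getD x 0)) none (some (max k 0))

-- ===== PRECONDITION & SPEC =====
def Spec_smallest_k (the_list : List Int) (k : Int) (out : List Int) : Prop := out = smallest_k_alt the_list k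
instance (the_list : List Int) (k : Int) (out : List Int) : Decidable (Spec_smallest_k the_list k out) := by unfold Spec_smallest_k; infer_instance

-- ===== CLAIM (what is proved, stated in full; the proofs are below) =====
def Claim_equal_smallest_k : Prop := ∀ (the_list : List Int) (k : Int), Dom_smallest_k the_list k → Spec_smallest_k the_list k (smallest_k the_list k)

-- ===== LEMMAS AND PROOFS =====

-- A's counting loop builds exactly Counter(the_list).
theorem smallest_k_counts_eq (the_list : List Int) :
    (PySem.List.pyRange 0 (the_list.length : Int) 1).foldl
      (fun d i =>
        let ele := PySem.List.pyGetD the_list i 0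
        let d := d.setdefault ele 0
        d.insert ele (d.getD ele 0 + 1))
      PySem.Dict.empty
    = PySem.Dict.counter the_list := by
  have h1 : (PySem.List.pyRange 0 (the_list.length : Int) 1).foldl
      (fun d i =>
        let ele := PySem.List.pyGetD the_list i 0
        let d := d.setdefault ele 0
        d.insert ele (d.getD ele 0 + 1))
      (PySem.Dict.empty : PySem.Dict Int Int)
    = the_list.foldl
        (fun d ele => let d := d.setdefault ele 0; d.insert ele (d.getD ele 0 + 1))
        PySem.Dict.empty :=
    PySem.List.foldl_pyRange_zero_pyGetD' the_list 0
      (fun d ele => let d := d.setdefault ele 0; d.insert ele (d.getD ele 0 + 1))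
      (PySem.Dict.empty : PySem.Dict Int Int)
  refine h1.trans ?_
  rw [← PySem.Dict.foldl_insert_getD_add_one_eq_counter]
  suffices h : ∀ (xs : List Int) (d : PySem.Dict Int Int),
      xs.foldl (fun d ele => let d := d.setdefault ele 0; d.insert ele (d.getD ele 0 + 1)) d
        = xs.foldl (fun d x => d.insert x (d.getD x 0 + 1)) d from h the_list _
  intro xs
  induction xs with
  | nil => intro d; rfl
  | cons x xs ih =>
      intro d
      simp only [List.foldl_cons]
      have hstep : (let d' := d.setdefault x 0; d'.insert x (d'.getD x 0 + 1))
          = d.insert x (d.getD x 0 + 1) := by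
        by_cases h : d.contains x = true
        · simp [PySem.Dict.setdefault_of_contains _ _ h]
        · have h' : d.contains x = false := by revert h; cases d.contains x <;> simp
          simp [PySem.Dict.setdefault_of_not_contains _ _ h',
                PySem.Dict.getD_insert_self, PySem.Dict.insert_insert_self,
                PySem.Dict.getD_of_not_contains _ _ h']
      simp only at hstep
      rw [hstep]; exact ih _

-- the key lemma about A: budgeted loop over keys = full grouped list, then take max(k,0)
theorem smallestKLoopA_eq_take (d : PySem.Dict Int Int) :
    ∀ (l : List (Int × Int)) (k : Int),
    (∀ p ∈ l, d.getD p.1 0 = p.2 ∧ 1 ≤ p.2) →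
    smallestKLoopA (l.map Prod.fst) d k
      = (l.flatMap (fun p => List.replicate p.2.toNat p.1)).take (max k 0).toNat := by
  intro l
  induction l with
  | nil => intro k _; simp [smallestKLoopA]
  | cons p rest ih =>
      intro k h
      obtain ⟨hget, hpos⟩ := h p (List.mem_cons_self)
      have hrest : ∀ q ∈ rest, d.getD q.1 0 = q.2 ∧ 1 ≤ q.2 :=
        fun q hq => h q (List.mem_cons_of_mem _ hq)
      obtain ⟨key, c⟩ := p
      simp only [List.map_cons, smallestKLoopA, List.flatMap_cons]
      simp only at hget hpos
      rw [hget]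
      rw [List.take_append]
      rcases le_or_gt k 0 with hk | hk
      · have hmin : min k c = k := min_eq_left (by omega)
        have h1 : k - min k c ≤ 0 := by omega
        rw [if_pos (by simpa [hmin] using h1)]
        have : k.toNat = 0 := by omega
        have hm : (max k 0).toNat = 0 := by omega
        simp [hmin, this, hm]
      · rcases le_or_gt k c with hkc | hkc
        · -- budget fits in this key's count: stop here
          have hmin : min k c = k := min_eq_left hkc
          rw [if_pos (by omega)]
          have hlen : (max k 0).toNat ≤ (List.replicate c.toNat key).length := by
            simp [List.length_replicate]; omega
          have h2 : (max k 0).toNat - (List.replicate c.toNat key).length = 0 := by omega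
          rw [h2]
          simp [hmin, List.take_replicate]
          omega
        · -- this key's count is exhausted: recurse with the rest of the budget
          have hmin : min k c = c := min_eq_right (by omega)
          rw [if_neg (by omega)]
          rw [ih (k - min k c) hrest]
          have h3 : (max k 0).toNat - (List.replicate c.toNat key).length
              = (max (k - min k c) 0).toNat := by
            simp [List.length_replicate, hmin]; omega
          have h4 : List.take (max k 0).toNat (List.replicate c.toNat key)
              = List.replicate c.toNat key := by
            apply List.take_of_length_le; simp [List.length_replicate]; omega
          rw [h3, h4, hmin]

-- B's first-index dict: getD v 0 is v's first-occurrence index (shifted by the start s).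
theorem firstFold (xs : List Int) : ∀ (s : Int) (d : PySem.Dict Int Int) (v : Int),
    ((PySem.List.enumerate xs s).foldl
        (fun d p => if d.contains p.2 then d else d.insert p.2 p.1) d).getD v 0
      = if d.contains v then d.getD v 0
        else if v ∈ xs then s + (List.idxOf v xs : Int) else 0 := by
  induction xs with
  | nil => intro s d v; simp [PySem.List.enumerate_nil]; intro h; simp [PySem.Dict.getD_of_not_contains _ _ h]
  | cons x xs ih =>
      intro s d v
      rw [PySem.List.enumerate_cons]
      simp only [List.foldl_cons]
      by_cases hdx : d.contains x = true
      · rw [if_pos hdx, ih (s + 1) d v]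
        by_cases hdv : d.contains v = true
        · simp [hdv]
        · have hvx : v ≠ x := fun h => hdv (h ▸ hdx)
          simp only [hdv, Bool.false_eq_true, if_false]
          by_cases hmem : v ∈ xs
          · have hmem' : v ∈ x :: xs := List.mem_cons_of_mem _ hmem
            rw [if_pos hmem, if_pos hmem', List.idxOf_cons]
            have : (x == v) = false := beq_eq_false_iff_ne.mpr (fun h => hvx h.symm)
            simp [this]; push_cast; ring
          · have hmem' : v ∉ x :: xs := by simp [hmem, hvx]
            rw [if_neg hmem, if_neg hmem']
      · rw [if_neg hdx, ih (s + 1) (d.insert x s) v]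
        by_cases hvx : v = x
        · subst hvx
          rw [if_pos (PySem.Dict.contains_insert_self d v s)]
          have hdv : d.contains v = false := by revert hdx; cases d.contains v <;> simp
          simp [PySem.Dict.getD_insert_self, hdv, List.idxOf_cons]
        · have hci : (d.insert x s).contains v = d.contains v := by
            rw [PySem.Dict.contains_insert]
            have : (v == x) = false := by simp [hvx]
            simp [this]
          rw [hci]
          by_cases hdv : d.contains v = true
          · rw [if_pos hdv, if_pos hdv, PySem.Dict.getD_insert_of_ne _ _ _ hvx]
          · simp only [hdv, Bool.false_eq_true, if_false]
            by_cases hmem : v ∈ xs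
            · have hmem' : v ∈ x :: xs := List.mem_cons_of_mem _ hmem
              rw [if_pos hmem, if_pos hmem', List.idxOf_cons]
              have : (x == v) = false := beq_eq_false_iff_ne.mpr (fun h => hvx h.symm)
              simp [this]; push_cast; ring
            · have hmem' : v ∉ x :: xs := by simp [hmem, hvx]
              rw [if_neg hmem, if_neg hmem']

-- two members with the same first index are equal
theorem idxOf_inj_of_mem {l : List Int} {a b : Int} (ha : a ∈ l) (hb : b ∈ l)
    (h : List.idxOf a l = List.idxOf b l) : a = b := by
  have h1 := List.getElem_idxOf (List.idxOf_lt_length_of_mem ha)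
  have h2 := List.getElem_idxOf (List.idxOf_lt_length_of_mem hb)
  rw [← h1, ← h2]
  simp [h]

-- the distinct values in first-appearance order have strictly increasing first indices
theorem ofList_aux (the_list : List Int) :
    ∀ (rest p s : List Int),
    the_list = p ++ rest →
    (∀ a, a ∈ s ↔ a ∈ p) →
    s.Pairwise (fun a b => List.idxOf a the_list < List.idxOf b the_list) →
    (∀ a ∈ s, List.idxOf a the_list < p.length) →
    (rest.foldl PySem.Set.add s).Pairwise
      (fun a b => List.idxOf a the_list < List.idxOf b the_list) := by
  intro rest
  induction rest with
  | nil => intro p s _ _ hpw _; exact hpw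
  | cons x rest ih =>
      intro p s hsplit hmem hpw hbound
      simp only [List.foldl_cons]
      by_cases hx : x ∈ s
      · have hadd : PySem.Set.add s x = s := by
          simp [PySem.Set.add, PySem.Set.contains, hx]
        rw [hadd]
        refine ih (p ++ [x]) s (by rw [hsplit]; simp) ?_ hpw ?_
        · intro a; rw [hmem a]
          constructor
          · intro h; exact List.mem_append.mpr (Or.inl h)
          · intro h
            rcases List.mem_append.mp h with h | h
            · exact h
            · simp at h; rw [h]; exact (hmem x).mp hx
        · intro a ha; have := hbound a ha; simp; omega
      · have hadd : PySem.Set.add s x = s ++ [x] := by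
          have hx' : x ∉ s := hx
          simp [PySem.Set.add, PySem.Set.contains, hx']
        rw [hadd]
        have hxp : x ∉ p := fun h => hx ((hmem x).mpr h)
        have hidx : List.idxOf x the_list = p.length := by
          rw [hsplit, List.idxOf_append, if_neg hxp, List.idxOf_cons]
          simp
        refine ih (p ++ [x]) (s ++ [x]) (by rw [hsplit]; simp) ?_ ?_ ?_
        · intro a
          simp only [List.mem_append, List.mem_singleton]
          rw [hmem a]
        · rw [List.pairwise_append]
          refine ⟨hpw, by simp, ?_⟩
          intro a ha b hb
          simp at hb; subst hb
          rw [hidx]; exact hbound a ha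
        · intro a ha
          rcases List.mem_append.mp ha with h | h
          · have := hbound a h; simp; omega
          · simp at h; subst h; rw [hidx]; simp

-- counting elements of the grouped flatMap
theorem count_flatMap_replicate (n : Int → Nat) :
    ∀ (ds : List Int), ds.Nodup → ∀ (a : Int),
    (ds.flatMap (fun v => List.replicate (n v) v)).count a = if a ∈ ds then n a else 0 := by
  intro ds
  induction ds with
  | nil => intro _ a; simp
  | cons d ds ih =>
      intro hnd a
      rcases List.nodup_cons.mp hnd with ⟨hd, hnd'⟩
      rw [List.flatMap_cons, List.count_append, List.count_replicate, ih hnd' a]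
      by_cases had : a = d
      · subst had
        have : a ∉ ds := hd
        simp [this]
      · have : (d == a) = false := beq_eq_false_iff_ne.mpr (fun h => had h.symm)
        simp [this, had]

-- grouped flatMap over a strictly key-increasing list is key-nondecreasing
theorem pairwise_flatMap_replicate (key : Int → Int) (n : Int → Nat) :
    ∀ (ds : List Int), ds.Pairwise (fun a b => key a < key b) →
    (ds.flatMap (fun v => List.replicate (n v) v)).Pairwise (fun a b => key a ≤ key b) := by
  intro ds
  induction ds with
  | nil => intro _; simp
  | cons d ds ih =>
      intro hpw
      rcases List.pairwise_cons.mp hpw with ⟨hd, hpw'⟩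
      rw [List.flatMap_cons, List.pairwise_append]
      refine ⟨?_, ih hpw', ?_⟩
      · apply List.Pairwise.imp_of_mem (R := fun a b => a = d ∧ b = d)
        · rintro a b _ _ ⟨ha, hb⟩; rw [ha, hb]
        · apply List.pairwise_iff_forall_sublist.mpr
          intro a b hsub
          have := hsub.subset
          constructor
          · exact List.eq_of_mem_replicate (this (by simp))
          · exact List.eq_of_mem_replicate (this (by simp))
      · intro a ha b hb
        have ha' : a = d := List.eq_of_mem_replicate ha
        obtain ⟨v, hv, hbv⟩ := List.mem_flatMap.mp hb
        have hb' : b = v := List.eq_of_mem_replicate hbv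
        rw [ha', hb']
        exact le_of_lt (hd v hv)

theorem smallest_k_eq_alt (the_list : List Int) (k : Int) :
    smallest_k the_list k = smallest_k_alt the_list k := by
  have hitems : ∀ p ∈ (PySem.Dict.counter the_list).items,
      (PySem.Dict.counter the_list).getD p.1 0 = p.2 ∧ 1 ≤ p.2 := by
    intro p hp
    have hnd := PySem.Dict.nodup_keys_counter (xs := the_list)
    obtain ⟨key, c⟩ := p
    refine ⟨PySem.Dict.getD_of_mem_items _ hp hnd 0, ?_⟩
    rw [PySem.Dict.items_counter] at hp
    simp only [List.mem_map] at hp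
    obtain ⟨x, hx, hxeq⟩ := hp
    have hmem : x ∈ the_list := (PySem.Set.mem_ofList _ _).mp hx
    have : 0 < the_list.count x := List.count_pos_iff.mpr hmem
    have hc : c = (the_list.count x : Int) := by
      have := congrArg Prod.snd hxeq; simpa using this.symm
    omega
  have hkeys : (PySem.Dict.counter the_list).keys
      = (PySem.Dict.counter the_list).items.map Prod.fst := rfl
  -- abbreviations for B's pieces
  set first := (PySem.List.enumerate the_list).foldl
    (fun d p => if d.contains p.2 then d else d.insert p.2 p.1)
    (PySem.Dict.empty : PySem.Dict Int Int) with hfirst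
  set keyB := fun x => first.getD x 0 with hkeyB
  set G := (PySem.Set.ofList the_list).flatMap
    (fun v => List.replicate (the_list.count v) v) with hG
  -- keyB agrees with the first-occurrence index on members
  have hkey : ∀ v ∈ the_list, keyB v = (List.idxOf v the_list : Int) := by
    intro v hv
    show first.getD v 0 = _
    rw [hfirst, firstFold the_list 0 PySem.Dict.empty v]
    simp [PySem.Dict.contains_empty, hv]
  -- G is a permutation of the_list
  have hGperm : G.Perm the_list := by
    rw [hG]
    apply List.perm_iff_count.mpr
    intro a
    rw [count_flatMap_replicate (fun v => the_list.count v) _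
          (PySem.Set.nodup_ofList the_list) a]
    by_cases ha : a ∈ the_list
    · simp [(PySem.Set.mem_ofList _ _).mpr ha]
    · have : a ∉ PySem.Set.ofList the_list := fun h => ha ((PySem.Set.mem_ofList _ _).mp h)
      simp [this, List.count_eq_zero.mpr ha]
  -- G is keyB-nondecreasing
  have hGpw : G.Pairwise (fun a b => keyB a ≤ keyB b) := by
    rw [hG]
    apply pairwise_flatMap_replicate
    have h1 : (PySem.Set.ofList the_list).Pairwise
        (fun a b => List.idxOf a the_list < List.idxOf b the_list) := by
      rw [PySem.Set.ofList_eq_foldl]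
      exact ofList_aux the_list the_list [] [] rfl (by simp) (by simp) (by simp)
    apply List.Pairwise.imp_of_mem ?_ h1
    intro a b ha hb hlt
    have ha' : a ∈ the_list := (PySem.Set.mem_ofList _ _).mp ha
    have hb' : b ∈ the_list := (PySem.Set.mem_ofList _ _).mp hb
    rw [hkey a ha', hkey b hb']
    exact_mod_cast hlt
  -- the stable sort by first index IS the grouped list G
  have hsortG : PySem.List.sorted the_list keyB = G := by
    apply List.eq_of_perm_of_sorted ?_ (PySem.List.sorted_pairwise the_list keyB) hGpw
        ((PySem.List.sorted_perm the_list keyB false).trans hGperm.symm)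
    intro a b ha hb hab hba
    have ha' : a ∈ the_list := (PySem.List.mem_sorted the_list keyB false a).mp ha
    have hb' : b ∈ the_list := by
      obtain ⟨v, hv, hbv⟩ := List.mem_flatMap.mp hb
      rw [List.eq_of_mem_replicate hbv]
      exact (PySem.Set.mem_ofList _ _).mp hv
    have heq : keyB a = keyB b := le_antisymm hab hba
    rw [hkey a ha', hkey b hb'] at heq
    exact idxOf_inj_of_mem ha' hb' (by exact_mod_cast heq)
  -- A's grouped flatMap over counter items is G too
  have hAG : (PySem.Dict.counter the_list).items.flatMap
      (fun p => List.replicate p.2.toNat p.1) = G := by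
    rw [PySem.Dict.items_counter, List.flatMap_map, hG]
    apply List.flatMap_congr
    intro x _
    simp [Int.toNat_natCast]
  unfold smallest_k smallest_k_alt
  simp only [smallest_k_counts_eq]
  rw [PySem.List.slice_to _ (le_max_right k 0), hkeys,
      smallestKLoopA_eq_take _ _ k hitems, hAG, ← hfirst, ← hkeyB, hsortG]

-- ===== VERDICT (by name: the statement is the Claim_ definition above) =====
theorem smallest_k_spec : Claim_equal_smallest_k := by
  intro the_list k _
  unfold Spec_smallest_k
  exact smallest_k_eq_alt the_list k
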